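-- pv_equiv track=rewrite | github.com/serda-dev/turkish-dataset-fixer | tokinizer-normalizer/build_jamba_samba_extension.py | compute_dependency_closure
-- ===== SOURCE A (Python) =====
-- def compute_dependency_closure(token, known_vocab, known_merges, parent_map, memo):
--     memo_key = (token, len(known_vocab), len(known_merges))
--     if memo_key in memo:
--         return memo[memo_key]
--
--     planned_tokens = []
--     planned_merges = []
--     visiting = set()
--
--     def walk(current):
--         if current in known_vocab or current in planned_tokens:
--             return True
--         if current in visiting:
--             return False
--         parent = parent_map.get(current)
--         if parent is None:
--             return False
--         visiting.add(current)
--         left, right, merge_index = parent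
--         if not walk(left) or not walk(right):
--             visiting.remove(current)
--             return False
--         visiting.remove(current)
--         merge = (left, right, merge_index)
--         if (left, right) not in known_merges and all((left, right) != (m[0], m[1]) for m in planned_merges):
--             planned_merges.append(merge)
--         if current not in known_vocab and current not in planned_tokens:
--             planned_tokens.append(current)
--         return True
--
--     ok = walk(token)
--     result = (ok, planned_tokens, planned_merges)
--     memo[memo_key] = result
--     return result
-- ===== SOURCE B (Python) =====
-- def compute_dependency_closure(token, known_vocab, known_merges, parent_map, memo):
--     # Iterative DFS with an explicit stack of frames instead of recursion.
--     # Like the original, it mutates memo (stores the result under its key).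
--     memo_key = (token, len(known_vocab), len(known_merges))
--     if memo_key in memo:
--         return memo[memo_key]
--
--     planned_tokens = []
--     planned_merges = []
--     visiting = set()
--     stack = []  # frames: [node, left, right, merge_index, stage]
--
--     def start(node):
--         # resolve immediately (True/False) or push a frame and return None
--         if node in known_vocab or node in planned_tokens:
--             return True
--         if node in visiting or node not in parent_map:
--             return False
--         left, right, merge_index = parent_map[node]
--         visiting.add(node)
--         stack.append([node, left, right, merge_index, 0])
--         return None
--
--     result = start(token)
--     while stack:
--         frame = stack[-1]
--         node, left, right, merge_index, stage = frame
--         if stage == 0: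
--             frame[4] = 1
--             result = start(left)
--         elif stage == 1:
--             if result is False:
--                 stack.pop()
--                 visiting.remove(node)
--             else:
--                 frame[4] = 2
--                 result = start(right)
--         else:  # stage 2: both children attempted
--             stack.pop()
--             visiting.remove(node)
--             if result is not False:
--                 if (left, right) not in known_merges and all(
--                     (left, right) != (m[0], m[1]) for m in planned_merges
--                 ):
--                     planned_merges.append((left, right, merge_index))
--                 if node not in known_vocab and node not in planned_tokens:
--                     planned_tokens.append(node)
--                 result = True
--
--     out = (result is True, planned_tokens, planned_merges)
--     memo[memo_key] = out
--     return out
-- ===== Notes on version B (the rewrite author's own statement) =====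
-- stated objective: alternative
-- what changed: The recursive walk over parent merges is replaced by an iterative DFS with an explicit stack of (node, left, right, merge_index, stage) frames and a propagated result flag, reproducing the same visit order, short-circuiting and append order without recursion.
import Mathlib
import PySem

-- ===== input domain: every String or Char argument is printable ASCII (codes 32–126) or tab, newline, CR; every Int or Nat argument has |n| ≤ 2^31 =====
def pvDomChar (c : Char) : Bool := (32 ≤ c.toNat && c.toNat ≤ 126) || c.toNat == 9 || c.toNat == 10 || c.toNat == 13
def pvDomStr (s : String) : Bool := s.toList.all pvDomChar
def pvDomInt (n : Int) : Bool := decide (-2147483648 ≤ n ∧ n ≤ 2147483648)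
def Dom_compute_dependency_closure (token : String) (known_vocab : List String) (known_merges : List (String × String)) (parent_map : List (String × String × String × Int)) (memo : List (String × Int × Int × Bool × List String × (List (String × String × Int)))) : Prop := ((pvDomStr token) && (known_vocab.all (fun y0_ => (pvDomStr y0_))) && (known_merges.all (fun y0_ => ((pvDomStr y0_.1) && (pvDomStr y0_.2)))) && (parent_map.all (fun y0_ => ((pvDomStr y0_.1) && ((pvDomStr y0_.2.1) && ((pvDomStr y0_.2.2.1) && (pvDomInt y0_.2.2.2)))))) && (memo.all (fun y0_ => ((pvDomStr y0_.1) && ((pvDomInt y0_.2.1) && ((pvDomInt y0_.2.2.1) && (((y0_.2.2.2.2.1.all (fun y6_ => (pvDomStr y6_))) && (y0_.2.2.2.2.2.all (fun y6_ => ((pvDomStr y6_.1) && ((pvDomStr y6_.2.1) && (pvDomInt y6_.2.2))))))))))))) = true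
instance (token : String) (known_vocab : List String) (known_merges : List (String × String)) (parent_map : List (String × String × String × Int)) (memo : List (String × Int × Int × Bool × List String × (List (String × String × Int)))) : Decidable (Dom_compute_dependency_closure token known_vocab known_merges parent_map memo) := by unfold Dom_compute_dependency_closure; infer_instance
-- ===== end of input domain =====

-- B rewrites A's recursive dependency walk as an iterative DFS over an explicit stack of
-- (node, left, right, merge_index, stage) frames (objective: alternative decomposition, same cost).
-- Both A and B store the result in `memo` (an in-place mutation of the argument); the claim is
-- about the RETURN value only (both Pythons perform the identical memo insertion).

-- shared helper: the two memo lines both Pythons begin and end with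
-- memo is dict keyed by (token, len(known_vocab), len(known_merges)); lookup = first match
def pvMemoGet? (memo : List (String × Int × Int × Bool × List String × (List (String × String × Int))))
    (t : String) (nv nl : Int) : Option (Bool × List String × (List (String × String × Int))) :=
  (memo.find? (fun e => e.1 == t && e.2.1 == nv && e.2.2.1 == nl)).map (fun e => e.2.2.2)

-- ===== PORT A =====
-- termination measure for the recursive walk: parent_map keys not yet being visited
def pvKeysLeft (parent_map : List (String × String × String × Int)) (vis : PySem.Set String) : Nat :=
  (((PySem.Dict.mk parent_map).keys).filter (fun k => !(PySem.Set.contains vis k))).length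

-- a filter by a stricter predicate that loses at least the element x is strictly shorter
theorem pvFilterMono (p p' : String → Bool) (h : ∀ k, p' k = true → p k = true) :
    ∀ (L : List String), (L.filter p').length ≤ (L.filter p).length := by
  intro L
  induction L with
  | nil => simp
  | cons a t ih =>
    cases hpa : p' a
    · cases hqa : p a <;> simp [List.filter_cons, hpa, hqa] <;> omega
    · have := h a hpa
      simp [List.filter_cons, hpa, this]
      omega

theorem pvFilterLt (p p' : String → Bool) (h : ∀ k, p' k = true → p k = true)
    (K : List String) (x : String) (hx : x ∈ K) (hp : p x = true) (hp' : p' x = false) :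
    (K.filter p').length < (K.filter p).length := by
  obtain ⟨K₁, K₂, rfl⟩ := List.append_of_mem hx
  have m1 := pvFilterMono p p' h K₁
  have m2 := pvFilterMono p p' h K₂
  simp [List.filter_append, List.filter_cons, hp, hp']
  omega

-- each recursive call adds a fresh parent_map key to `visiting`, so the measure drops
theorem pvKeysLeft_add_lt (parent_map : List (String × String × String × Int))
    (vis : PySem.Set String) (x : String)
    (hvis : PySem.Set.contains vis x = false)
    (hmem : x ∈ (PySem.Dict.mk parent_map).keys) :
    pvKeysLeft parent_map (PySem.Set.add vis x) < pvKeysLeft parent_map vis := by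
  unfold pvKeysLeft
  have hxv : x ∉ vis := by simpa [PySem.Set.contains] using hvis
  apply pvFilterLt
  · intro k hk
    simp [PySem.Set.add, PySem.Set.contains, hxv] at hk ⊢
    tauto
  · exact hmem
  · simpa [PySem.Set.contains] using hxv
  · simp [PySem.Set.add, PySem.Set.contains, hxv]

-- Python's `walk`: `visiting` is add/removed in strict stack discipline, so it is threaded as a
-- downward parameter (the add before the recursive calls; the matching remove is the return)
def pvWalkA (known_vocab : List String) (known_merges : List (String × String))
    (parent_map : List (String × String × String × Int)) (vis : PySem.Set String)
    (current : String) (pt : List String) (pm : List (String × String × Int)) :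
    Bool × List String × (List (String × String × Int)) :=
  if known_vocab.contains current || pt.contains current then (true, pt, pm)
  else if hvis : PySem.Set.contains vis current = true then (false, pt, pm)
  else
    match hpar : PySem.Dict.get? (PySem.Dict.mk parent_map) current with
    | none => (false, pt, pm)
    | some (l, r, mi) =>
      match pvWalkA known_vocab known_merges parent_map (PySem.Set.add vis current) l pt pm with
      | (false, pt1, pm1) => (false, pt1, pm1)
      | (true, pt1, pm1) =>
        match pvWalkA known_vocab known_merges parent_map (PySem.Set.add vis current) r pt1 pm1 with
        | (false, pt2, pm2) => (false, pt2, pm2)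
        | (true, pt2, pm2) =>
          let pm3 := if !(known_merges.contains (l, r)) && pm2.all (fun m => !((l, r) == (m.1, m.2.1))) then pm2 ++ [(l, r, mi)] else pm2
          let pt3 := if !(known_vocab.contains current) && !(pt2.contains current) then pt2 ++ [current] else pt2
          (true, pt3, pm3)
termination_by pvKeysLeft parent_map vis
decreasing_by
  all_goals
    exact pvKeysLeft_add_lt _ _ _ (by simpa [PySem.Set.contains] using hvis) (by
      have hc : PySem.Dict.contains (PySem.Dict.mk parent_map) current = true := by
        cases h : PySem.Dict.contains (PySem.Dict.mk parent_map) current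
        · rw [← PySem.Dict.get?_eq_none_iff_contains] at h; rw [hpar] at h; cases h
        · rfl
      exact (PySem.Dict.contains_iff_mem_keys _ _).mp hc)

def compute_dependency_closure (token : String) (known_vocab : List String) (known_merges : List (String × String)) (parent_map : List (String × String × String × Int)) (memo : List (String × Int × Int × Bool × List String × (List (String × String × Int)))) : Bool × List String × (List (String × String × Int)) :=
  match pvMemoGet? memo token (known_vocab.length : Int) (known_merges.length : Int) with
  | some v => v
  | none => pvWalkA known_vocab known_merges parent_map PySem.Set.empty token [] []

-- ===== PORT B =====
-- Source B's `start(node)`: resolve immediately (some b) or push a stage-0 frame (none)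
def pvStartB (known_vocab : List String) (parent_map : List (String × String × String × Int))
    (node : String) (pt : List String) (vis : PySem.Set String)
    (stack : List (String × String × String × Int × Nat)) :
    Option Bool × PySem.Set String × List (String × String × String × Int × Nat) :=
  if known_vocab.contains node || pt.contains node then (some true, vis, stack)
  else if PySem.Set.contains vis node then (some false, vis, stack)
  else
    match PySem.Dict.get? (PySem.Dict.mk parent_map) node with
    | none => (some false, vis, stack)
    | some (l, r, mi) => (none, PySem.Set.add vis node, (node, l, r, mi, 0) :: stack)

-- Source B's while loop; `fuel` only makes the loop total in Lean (pvSim shows 3·2^|parent_map| is never exhausted)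
def pvLoopB (known_vocab : List String) (known_merges : List (String × String))
    (parent_map : List (String × String × String × Int)) (fuel : Nat)
    (stack : List (String × String × String × Int × Nat))
    (pt : List String) (pm : List (String × String × Int)) (vis : PySem.Set String)
    (res : Option Bool) : Bool × List String × (List (String × String × Int)) :=
  match stack with
  | [] => (res == some true, pt, pm)
  | (node, l, r, mi, stage) :: rest =>
    match fuel with
    | 0 => (false, pt, pm)  -- fuel guard, unreachable
    | fuel + 1 =>
      if stage == 0 then
        match pvStartB known_vocab parent_map l pt vis ((node, l, r, mi, 1) :: rest) with
        | (res', vis', stack') => pvLoopB known_vocab known_merges parent_map fuel stack' pt pm vis' res'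
      else if stage == 1 then
        if res == some false then
          pvLoopB known_vocab known_merges parent_map fuel rest pt pm (PySem.Set.discard vis node) (some false)
        else
          match pvStartB known_vocab parent_map r pt vis ((node, l, r, mi, 2) :: rest) with
          | (res', vis', stack') => pvLoopB known_vocab known_merges parent_map fuel stack' pt pm vis' res'
      else
        -- visiting.remove(node): node is always in `visiting` here, so remove ≡ discard
        let vis' := PySem.Set.discard vis node
        if res == some false then
          pvLoopB known_vocab known_merges parent_map fuel rest pt pm vis' (some false)
        else
          let pm' := if !(known_merges.contains (l, r)) && pm.all (fun m => !((l, r) == (m.1, m.2.1))) then pm ++ [(l, r, mi)] else pm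
          let pt' := if !(known_vocab.contains node) && !(pt.contains node) then pt ++ [node] else pt
          pvLoopB known_vocab known_merges parent_map fuel rest pt' pm' vis' (some true)

def compute_dependency_closure_alt (token : String) (known_vocab : List String) (known_merges : List (String × String)) (parent_map : List (String × String × String × Int)) (memo : List (String × Int × Int × Bool × List String × (List (String × String × Int)))) : Bool × List String × (List (String × String × Int)) :=
  match pvMemoGet? memo token (known_vocab.length : Int) (known_merges.length : Int) with
  | some v => v
  | none =>
    match pvStartB known_vocab parent_map token [] PySem.Set.empty [] with
    | (res, vis, stack) =>
      pvLoopB known_vocab known_merges parent_map (3 * 2 ^ parent_map.length) stack [] [] vis res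

-- ===== PRECONDITION & SPEC =====
def Spec_compute_dependency_closure (token : String) (known_vocab : List String) (known_merges : List (String × String)) (parent_map : List (String × String × String × Int)) (memo : List (String × Int × Int × Bool × List String × (List (String × String × Int)))) (out : Bool × List String × (List (String × String × Int))) : Prop := out = compute_dependency_closure_alt token known_vocab known_merges parent_map memo
instance (token : String) (known_vocab : List String) (known_merges : List (String × String)) (parent_map : List (String × String × String × Int)) (memo : List (String × Int × Int × Bool × List String × (List (String × String × Int)))) (out : Bool × List String × (List (String × String × Int))) : Decidable (Spec_compute_dependency_closure token known_vocab known_merges parent_map memo out) := by unfold Spec_compute_dependency_closure; infer_instance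

-- ===== CLAIM (what is proved, stated in full; the proofs are below) =====
def Claim_equal_compute_dependency_closure : Prop := ∀ (token : String) (known_vocab : List String) (known_merges : List (String × String)) (parent_map : List (String × String × String × Int)) (memo : List (String × Int × Int × Bool × List String × (List (String × String × Int)))), Dom_compute_dependency_closure token known_vocab known_merges parent_map memo → Spec_compute_dependency_closure token known_vocab known_merges parent_map memo (compute_dependency_closure token known_vocab known_merges parent_map memo)

-- ===== LEMMAS AND PROOFS =====

theorem pvDiscardAdd (vis : PySem.Set String) (x : String)
    (hvis : PySem.Set.contains vis x = false) :
    PySem.Set.discard (PySem.Set.add vis x) x = vis := by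
  have hxv : x ∉ vis := by simpa [PySem.Set.contains] using hvis
  have hadd : PySem.Set.add vis x = vis ++ [x] := by
    simp [PySem.Set.add, PySem.Set.contains, hxv]
  rw [hadd]
  simp [PySem.Set.discard, List.filter_append]
  intro a ha h
  exact hxv (h ▸ ha)

-- step lemmas for A's walk (one unfolding each)
theorem pvW1 (kv : List String) (km : List (String × String)) (pmap : List (String × String × String × Int))
    (vis : PySem.Set String) (node : String) (pt : List String) (pm : List (String × String × Int))
    (h1 : node ∈ kv ∨ node ∈ pt) :
    pvWalkA kv km pmap vis node pt pm = (true, pt, pm) := by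
  unfold pvWalkA; simp [h1]

theorem pvW2 (kv : List String) (km : List (String × String)) (pmap : List (String × String × String × Int))
    (vis : PySem.Set String) (node : String) (pt : List String) (pm : List (String × String × Int))
    (hkv : node ∉ kv) (hpt : node ∉ pt) (hv : node ∈ vis) :
    pvWalkA kv km pmap vis node pt pm = (false, pt, pm) := by
  unfold pvWalkA; simp [hkv, hpt, hv]

theorem pvW3 (kv : List String) (km : List (String × String)) (pmap : List (String × String × String × Int))
    (vis : PySem.Set String) (node : String) (pt : List String) (pm : List (String × String × Int))
    (hkv : node ∉ kv) (hpt : node ∉ pt) (hv : node ∉ vis)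
    (hpar : PySem.Dict.get? (PySem.Dict.mk pmap) node = none) :
    pvWalkA kv km pmap vis node pt pm = (false, pt, pm) := by
  unfold pvWalkA; simp [hkv, hpt, hv]; split <;> simp_all

theorem pvW4 (kv : List String) (km : List (String × String)) (pmap : List (String × String × String × Int))
    (vis : PySem.Set String) (node : String) (pt : List String) (pm : List (String × String × Int))
    (l r : String) (mi : Int) (pt1 : List String) (pm1 : List (String × String × Int))
    (hkv : node ∉ kv) (hpt : node ∉ pt) (hv : node ∉ vis)
    (hpar : PySem.Dict.get? (PySem.Dict.mk pmap) node = some (l, r, mi))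
    (hWL : pvWalkA kv km pmap (PySem.Set.add vis node) l pt pm = (false, pt1, pm1)) :
    pvWalkA kv km pmap vis node pt pm = (false, pt1, pm1) := by
  unfold pvWalkA
  have hadd : PySem.Set.add vis node = vis ++ [node] := by
    simp [PySem.Set.add, PySem.Set.contains, hv]
  rw [hadd] at hWL
  simp [hkv, hpt, hv]; split <;> simp_all

theorem pvW5 (kv : List String) (km : List (String × String)) (pmap : List (String × String × String × Int))
    (vis : PySem.Set String) (node : String) (pt : List String) (pm : List (String × String × Int))
    (l r : String) (mi : Int) (pt1 : List String) (pm1 : List (String × String × Int))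
    (pt2 : List String) (pm2 : List (String × String × Int))
    (hkv : node ∉ kv) (hpt : node ∉ pt) (hv : node ∉ vis)
    (hpar : PySem.Dict.get? (PySem.Dict.mk pmap) node = some (l, r, mi))
    (hWL : pvWalkA kv km pmap (PySem.Set.add vis node) l pt pm = (true, pt1, pm1))
    (hWR : pvWalkA kv km pmap (PySem.Set.add vis node) r pt1 pm1 = (false, pt2, pm2)) :
    pvWalkA kv km pmap vis node pt pm = (false, pt2, pm2) := by
  unfold pvWalkA
  have hadd : PySem.Set.add vis node = vis ++ [node] := by
    simp [PySem.Set.add, PySem.Set.contains, hv]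
  rw [hadd] at hWL hWR
  simp [hkv, hpt, hv]; split <;> simp_all

theorem pvW6 (kv : List String) (km : List (String × String)) (pmap : List (String × String × String × Int))
    (vis : PySem.Set String) (node : String) (pt : List String) (pm : List (String × String × Int))
    (l r : String) (mi : Int) (pt1 : List String) (pm1 : List (String × String × Int))
    (pt2 : List String) (pm2 : List (String × String × Int))
    (hkv : node ∉ kv) (hpt : node ∉ pt) (hv : node ∉ vis)
    (hpar : PySem.Dict.get? (PySem.Dict.mk pmap) node = some (l, r, mi))
    (hWL : pvWalkA kv km pmap (PySem.Set.add vis node) l pt pm = (true, pt1, pm1))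
    (hWR : pvWalkA kv km pmap (PySem.Set.add vis node) r pt1 pm1 = (true, pt2, pm2)) :
    pvWalkA kv km pmap vis node pt pm =
      (true,
       (if !(kv.contains node) && !(pt2.contains node) then pt2 ++ [node] else pt2),
       (if !(km.contains (l, r)) && pm2.all (fun m => !((l, r) == (m.1, m.2.1))) then pm2 ++ [(l, r, mi)] else pm2)) := by
  unfold pvWalkA
  have hadd : PySem.Set.add vis node = vis ++ [node] := by
    simp [PySem.Set.add, PySem.Set.contains, hv]
  rw [hadd] at hWL hWR
  simp [hkv, hpt, hv]; split <;> simp_all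
  obtain ⟨rfl, rfl, rfl⟩ := hpar
  rfl

-- step lemmas for Source B's `start`
theorem pvS1 (kv : List String) (pmap : List (String × String × String × Int))
    (node : String) (pt : List String) (vis : PySem.Set String)
    (S : List (String × String × String × Int × Nat))
    (h1 : node ∈ kv ∨ node ∈ pt) :
    pvStartB kv pmap node pt vis S = (some true, vis, S) := by
  unfold pvStartB; simp [h1]

theorem pvS2 (kv : List String) (pmap : List (String × String × String × Int))
    (node : String) (pt : List String) (vis : PySem.Set String)
    (S : List (String × String × String × Int × Nat))
    (hkv : node ∉ kv) (hpt : node ∉ pt) (hv : node ∈ vis) :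
    pvStartB kv pmap node pt vis S = (some false, vis, S) := by
  unfold pvStartB; simp [hkv, hpt, hv]

theorem pvS3 (kv : List String) (pmap : List (String × String × String × Int))
    (node : String) (pt : List String) (vis : PySem.Set String)
    (S : List (String × String × String × Int × Nat))
    (hkv : node ∉ kv) (hpt : node ∉ pt) (hv : node ∉ vis)
    (hpar : PySem.Dict.get? (PySem.Dict.mk pmap) node = none) :
    pvStartB kv pmap node pt vis S = (some false, vis, S) := by
  unfold pvStartB; simp [hkv, hpt, hv, hpar]

theorem pvS4 (kv : List String) (pmap : List (String × String × String × Int))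
    (node : String) (pt : List String) (vis : PySem.Set String)
    (S : List (String × String × String × Int × Nat))
    (l r : String) (mi : Int)
    (hkv : node ∉ kv) (hpt : node ∉ pt) (hv : node ∉ vis)
    (hpar : PySem.Dict.get? (PySem.Dict.mk pmap) node = some (l, r, mi)) :
    pvStartB kv pmap node pt vis S = (none, PySem.Set.add vis node, (node, l, r, mi, 0) :: S) := by
  unfold pvStartB; simp [hkv, hpt, hv, hpar]

-- step lemmas for B's loop (one iteration each)
theorem pvL0 (kv : List String) (km : List (String × String)) (pmap : List (String × String × String × Int))
    (f : Nat) (pt : List String) (pm : List (String × String × Int)) (vis : PySem.Set String) (res : Option Bool) :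
    pvLoopB kv km pmap f [] pt pm vis res = (res == some true, pt, pm) := by
  cases f <;> rfl

theorem pvLs0 (kv : List String) (km : List (String × String)) (pmap : List (String × String × String × Int))
    (f : Nat) (node l r : String) (mi : Int) (rest : List (String × String × String × Int × Nat))
    (pt : List String) (pm : List (String × String × Int)) (vis : PySem.Set String) (res : Option Bool) :
    pvLoopB kv km pmap (f + 1) ((node, l, r, mi, 0) :: rest) pt pm vis res =
      (match pvStartB kv pmap l pt vis ((node, l, r, mi, 1) :: rest) with
       | (res', vis', stack') => pvLoopB kv km pmap f stack' pt pm vis' res') := by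
  rfl

theorem pvLs1f (kv : List String) (km : List (String × String)) (pmap : List (String × String × String × Int))
    (f : Nat) (node l r : String) (mi : Int) (rest : List (String × String × String × Int × Nat))
    (pt : List String) (pm : List (String × String × Int)) (vis : PySem.Set String) :
    pvLoopB kv km pmap (f + 1) ((node, l, r, mi, 1) :: rest) pt pm vis (some false) =
      pvLoopB kv km pmap f rest pt pm (PySem.Set.discard vis node) (some false) := by
  rfl

theorem pvLs1t (kv : List String) (km : List (String × String)) (pmap : List (String × String × String × Int))
    (f : Nat) (node l r : String) (mi : Int) (rest : List (String × String × String × Int × Nat))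
    (pt : List String) (pm : List (String × String × Int)) (vis : PySem.Set String) :
    pvLoopB kv km pmap (f + 1) ((node, l, r, mi, 1) :: rest) pt pm vis (some true) =
      (match pvStartB kv pmap r pt vis ((node, l, r, mi, 2) :: rest) with
       | (res', vis', stack') => pvLoopB kv km pmap f stack' pt pm vis' res') := by
  rfl

theorem pvLs2f (kv : List String) (km : List (String × String)) (pmap : List (String × String × String × Int))
    (f : Nat) (node l r : String) (mi : Int) (rest : List (String × String × String × Int × Nat))
    (pt : List String) (pm : List (String × String × Int)) (vis : PySem.Set String) :
    pvLoopB kv km pmap (f + 1) ((node, l, r, mi, 2) :: rest) pt pm vis (some false) =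
      pvLoopB kv km pmap f rest pt pm (PySem.Set.discard vis node) (some false) := by
  rfl

theorem pvLs2t (kv : List String) (km : List (String × String)) (pmap : List (String × String × String × Int))
    (f : Nat) (node l r : String) (mi : Int) (rest : List (String × String × String × Int × Nat))
    (pt : List String) (pm : List (String × String × Int)) (vis : PySem.Set String) :
    pvLoopB kv km pmap (f + 1) ((node, l, r, mi, 2) :: rest) pt pm vis (some true) =
      pvLoopB kv km pmap f rest
        (if !(kv.contains node) && !(pt.contains node) then pt ++ [node] else pt)
        (if !(km.contains (l, r)) && pm.all (fun m => !((l, r) == (m.1, m.2.1))) then pm ++ [(l, r, mi)] else pm)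
        (PySem.Set.discard vis node) (some true) := by
  rfl

-- the simulation: running the machine from `start node` with continuation S equals, after exactly c
-- fuel steps, the machine at S carrying walk's result (and visiting restored)
theorem pvSim (known_vocab : List String) (known_merges : List (String × String))
    (parent_map : List (String × String × String × Int)) :
    ∀ (n : Nat) (node : String) (pt : List String) (pm : List (String × String × Int))
      (vis : PySem.Set String), pvKeysLeft parent_map vis ≤ n →
    ∀ S, ∃ c, c + 3 ≤ 3 * 2 ^ n ∧ ∀ f,
      (match pvStartB known_vocab parent_map node pt vis S with
       | (res, vis', stack') => pvLoopB known_vocab known_merges parent_map (f + c) stack' pt pm vis' res)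
      = pvLoopB known_vocab known_merges parent_map f S
          (pvWalkA known_vocab known_merges parent_map vis node pt pm).2.1
          (pvWalkA known_vocab known_merges parent_map vis node pt pm).2.2
          vis (some (pvWalkA known_vocab known_merges parent_map vis node pt pm).1) := by
  intro n
  induction n with
  | zero =>
    intro node pt pm vis hle S
    refine ⟨0, by norm_num, ?_⟩
    intro f
    by_cases h1 : node ∈ known_vocab ∨ node ∈ pt
    · rw [pvS1 _ _ _ _ _ _ h1, pvW1 _ _ _ _ _ _ _ h1]; rfl
    · push_neg at h1
      obtain ⟨hkv, hpt⟩ := h1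
      by_cases hv : node ∈ vis
      · rw [pvS2 _ _ _ _ _ _ hkv hpt hv, pvW2 _ _ _ _ _ _ _ hkv hpt hv]; rfl
      · cases hpar : PySem.Dict.get? (PySem.Dict.mk parent_map) node with
        | none => rw [pvS3 _ _ _ _ _ _ hkv hpt hv hpar, pvW3 _ _ _ _ _ _ _ hkv hpt hv hpar]; rfl
        | some v =>
          exfalso
          obtain ⟨l, r, mi⟩ := v
          have hvb : PySem.Set.contains vis node = false := by
            simpa [PySem.Set.contains] using hv
          have hmem : node ∈ (PySem.Dict.mk parent_map).keys := by
            have hc : PySem.Dict.contains (PySem.Dict.mk parent_map) node = true := by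
              cases h : PySem.Dict.contains (PySem.Dict.mk parent_map) node
              · rw [← PySem.Dict.get?_eq_none_iff_contains] at h; rw [hpar] at h; cases h
              · rfl
            exact (PySem.Dict.contains_iff_mem_keys _ _).mp hc
          have := pvKeysLeft_add_lt parent_map vis node hvb hmem
          omega
  | succ m ih =>
    intro node pt pm vis hle S
    have h1pow : 1 ≤ 2 ^ (m + 1) := Nat.one_le_two_pow
    by_cases h1 : node ∈ known_vocab ∨ node ∈ pt
    · refine ⟨0, by omega, ?_⟩
      intro f
      rw [pvS1 _ _ _ _ _ _ h1, pvW1 _ _ _ _ _ _ _ h1]; rfl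
    · push_neg at h1
      obtain ⟨hkv, hpt⟩ := h1
      by_cases hv : node ∈ vis
      · refine ⟨0, by omega, ?_⟩
        intro f
        rw [pvS2 _ _ _ _ _ _ hkv hpt hv, pvW2 _ _ _ _ _ _ _ hkv hpt hv]; rfl
      · cases hpar : PySem.Dict.get? (PySem.Dict.mk parent_map) node with
        | none =>
          refine ⟨0, by omega, ?_⟩
          intro f
          rw [pvS3 _ _ _ _ _ _ hkv hpt hv hpar, pvW3 _ _ _ _ _ _ _ hkv hpt hv hpar]; rfl
        | some v =>
          obtain ⟨l, r, mi⟩ := v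
          have hvb : PySem.Set.contains vis node = false := by
            simpa [PySem.Set.contains] using hv
          have hmem : node ∈ (PySem.Dict.mk parent_map).keys := by
            have hc : PySem.Dict.contains (PySem.Dict.mk parent_map) node = true := by
              cases h : PySem.Dict.contains (PySem.Dict.mk parent_map) node
              · rw [← PySem.Dict.get?_eq_none_iff_contains] at h; rw [hpar] at h; cases h
              · rfl
            exact (PySem.Dict.contains_iff_mem_keys _ _).mp hc
          have hlt := pvKeysLeft_add_lt parent_map vis node hvb hmem
          have hle' : pvKeysLeft parent_map (PySem.Set.add vis node) ≤ m := by omega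
          have h2pow : 3 * 2 ^ (m + 1) = 3 * 2 ^ m + 3 * 2 ^ m := by ring
          have h1pm : 1 ≤ 2 ^ m := Nat.one_le_two_pow
          obtain ⟨cL, hcL, hL⟩ := ih l pt pm (PySem.Set.add vis node) hle' ((node, l, r, mi, 1) :: S)
          rcases hWL : pvWalkA known_vocab known_merges parent_map (PySem.Set.add vis node) l pt pm with ⟨okL, pt1, pm1⟩
          cases okL with
          | false =>
            refine ⟨cL + 2, by omega, ?_⟩
            intro f
            rw [pvS4 _ _ _ _ _ _ _ _ _ hkv hpt hv hpar]
            dsimp only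
            have harith : f + (cL + 2) = (((f + 1) + cL) + 1) := by omega
            rw [harith, pvLs0, hL (f + 1), hWL]
            dsimp only
            rw [pvLs1f, pvDiscardAdd vis node hvb,
              pvW4 _ _ _ _ _ _ _ _ _ _ _ _ hkv hpt hv hpar hWL]
          | true =>
            obtain ⟨cR, hcR, hR⟩ := ih r pt1 pm1 (PySem.Set.add vis node) hle' ((node, l, r, mi, 2) :: S)
            rcases hWR : pvWalkA known_vocab known_merges parent_map (PySem.Set.add vis node) r pt1 pm1 with ⟨okR, pt2, pm2⟩
            refine ⟨cL + cR + 3, by omega, ?_⟩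
            intro f
            rw [pvS4 _ _ _ _ _ _ _ _ _ hkv hpt hv hpar]
            dsimp only
            have harith : f + (cL + cR + 3) = ((((f + cR + 2)) + cL) + 1) := by omega
            rw [harith, pvLs0, hL (f + cR + 2), hWL]
            dsimp only
            have h22 : f + cR + 2 = (((f + 1) + cR) + 1) := by omega
            rw [h22, pvLs1t, hR (f + 1), hWR]
            dsimp only
            cases okR with
            | false =>
              rw [pvLs2f, pvDiscardAdd vis node hvb,
                pvW5 _ _ _ _ _ _ _ _ _ _ _ _ _ _ hkv hpt hv hpar hWL hWR]
            | true =>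
              rw [pvLs2t, pvDiscardAdd vis node hvb,
                pvW6 _ _ _ _ _ _ _ _ _ _ _ _ _ _ hkv hpt hv hpar hWL hWR]

-- ===== VERDICT (by name: the statement is the Claim_ definition above) =====
theorem compute_dependency_closure_spec : Claim_equal_compute_dependency_closure := by
  intro token known_vocab known_merges parent_map memo _
  unfold Spec_compute_dependency_closure
  unfold compute_dependency_closure compute_dependency_closure_alt
  cases hm : pvMemoGet? memo token (known_vocab.length : Int) (known_merges.length : Int) with
  | some v => rfl
  | none =>
    have hle : pvKeysLeft parent_map PySem.Set.empty ≤ parent_map.length := by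
      unfold pvKeysLeft
      calc _ ≤ ((PySem.Dict.mk parent_map).keys).length := List.length_filter_le _ _
        _ = parent_map.length := by simp [PySem.Dict.keys_mk]
    obtain ⟨c, hc, hsim⟩ := pvSim known_vocab known_merges parent_map parent_map.length
      token [] [] PySem.Set.empty hle []
    have hf : (3 * 2 ^ parent_map.length - c) + c = 3 * 2 ^ parent_map.length := by omega
    have hrun := hsim (3 * 2 ^ parent_map.length - c)
    rw [hf] at hrun
    rw [hrun, pvL0]
    rcases pvWalkA known_vocab known_merges parent_map PySem.Set.empty token [] [] with ⟨ok, pt, pm⟩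
    cases ok <;> rfl
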